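-- pv_equiv track=rewrite | github.com/nickxu2406-SGP/AllegroSupport | scripts/prototype_demo.py | build_threads
-- ===== SOURCE A (Python) =====
-- from typing import List, Dict, Any, Tuple
--
-- def build_threads(emails: List[Dict]) -> Dict[str, List[Dict]]:
--     """按 conversation_id 分组构建线程"""
--     threads = {}
--
--     for email in emails:
--         conv_id = email['conversation_id']
--         if conv_id not in threads:
--             threads[conv_id] = []
--         threads[conv_id].append(email)
--
--     # 按时间排序
--     for conv_id in threads:
--         threads[conv_id].sort(key=lambda x: x['sent_at'])
--
--     return threads
-- ===== SOURCE B (Python) =====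
-- def build_threads(emails):
--     """Group by conversation_id via one global stable sort by sent_at."""
--     threads = {e['conversation_id']: [] for e in emails}
--     for e in sorted(emails, key=lambda x: x['sent_at']):
--         threads[e['conversation_id']].append(e)
--     return threads
-- ===== Notes on version B (the rewrite author's own statement) =====
-- stated objective: alternative
-- what changed: B replaces A's group-then-sort-each-bucket two-phase construction by pre-creating the buckets and filling them in a single pass over one global stable sort of all emails by sent_at (relying on sort stability to make each bucket sorted).
import Mathlib
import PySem

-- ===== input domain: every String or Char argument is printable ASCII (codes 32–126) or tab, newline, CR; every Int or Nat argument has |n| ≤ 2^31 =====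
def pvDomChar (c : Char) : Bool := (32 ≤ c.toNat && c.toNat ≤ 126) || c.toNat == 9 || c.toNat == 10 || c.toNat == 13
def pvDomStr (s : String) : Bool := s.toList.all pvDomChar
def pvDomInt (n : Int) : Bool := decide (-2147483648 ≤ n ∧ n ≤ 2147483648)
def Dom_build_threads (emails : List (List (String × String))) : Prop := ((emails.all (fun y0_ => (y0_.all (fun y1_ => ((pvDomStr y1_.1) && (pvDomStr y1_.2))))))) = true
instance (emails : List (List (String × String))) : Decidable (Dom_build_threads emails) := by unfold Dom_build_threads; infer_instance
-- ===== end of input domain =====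

-- B groups in a single pass over one global stable sort of the emails by 'sent_at'
-- (A groups first and then sorts every bucket separately); same return value, similar cost.

-- email['conversation_id'] / email['sent_at'] (total via default; Pre_ guarantees the keys exist)
def pvCid (e : List (String × String)) : String := (PySem.Dict.mk e).getD "conversation_id" ""
def pvSent (e : List (String × String)) : String := (PySem.Dict.mk e).getD "sent_at" ""

-- ===== PORT A =====
def build_threads (emails : List (List (String × String))) : List (String × List (List (String × String))) :=
  let threads := emails.foldl (fun d e =>
      let conv_id := pvCid e
      let d := if d.contains conv_id then d else d.insert conv_id ([] : List (List (String × String)))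
      d.insert conv_id (d.getD conv_id [] ++ [e])) PySem.Dict.empty
  let threads := threads.keys.foldl (fun d conv_id =>
      d.insert conv_id (PySem.List.sorted (d.getD conv_id []) pvSent false)) threads
  threads.items

-- ===== PORT B =====
def build_threads_alt (emails : List (List (String × String))) : List (String × List (List (String × String))) :=
  let threads0 := emails.foldl (fun d e =>
      d.insert (pvCid e) ([] : List (List (String × String)))) PySem.Dict.empty
  let threads := (PySem.List.sorted emails pvSent false).foldl (fun d e =>
      d.insert (pvCid e) (d.getD (pvCid e) [] ++ [e])) threads0
  threads.items

-- ===== PRECONDITION & SPEC =====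
-- Pre_ excludes exactly the inputs where the Python raises KeyError: an email missing
-- 'conversation_id' or 'sent_at'.
def Pre_build_threads (emails : List (List (String × String))) : Prop :=
  ∀ e ∈ emails, (PySem.Dict.mk e).contains "conversation_id" = true ∧ (PySem.Dict.mk e).contains "sent_at" = true
instance (emails : List (List (String × String))) : Decidable (Pre_build_threads emails) := by unfold Pre_build_threads; infer_instance

def pvWitness_build_threads : (List (List (String × String))) :=
  [[("conversation_id", "c1"), ("sent_at", "2")], [("conversation_id", "c1"), ("sent_at", "1")],
   [("conversation_id", "c2"), ("sent_at", "3")]]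

def Spec_build_threads (emails : List (List (String × String))) (out : List (String × List (List (String × String)))) : Prop := out = build_threads_alt emails
instance (emails : List (List (String × String))) (out : List (String × List (List (String × String)))) : Decidable (Spec_build_threads emails out) := by unfold Spec_build_threads; infer_instance

-- ===== CLAIM (what is proved, stated in full; the proofs are below) =====
def Claim_equal_build_threads : Prop := ∀ (emails : List (List (String × String))), Dom_build_threads emails → Pre_build_threads emails → Spec_build_threads emails (build_threads emails)

-- ===== LEMMAS AND PROOFS =====

-- A's body of loop 1 ('if conv_id not in threads: …; threads[conv_id].append(email)') is dict.modify
theorem stepA_eq_modify (d : PySem.Dict String (List (List (String × String)))) (k : String) (v : List (String × String)) :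
    (let d' := if d.contains k then d else d.insert k ([] : List (List (String × String)))
     d'.insert k (d'.getD k [] ++ [v])) = d.modify k [] (· ++ [v]) := by
  by_cases h : d.contains k = true
  · simp [h, PySem.Dict.modify]
  · simp only [h]
    simp [PySem.Dict.modify, PySem.Dict.getD_insert_self, PySem.Dict.insert_insert_self,
      PySem.Dict.getD_of_not_contains _ _ (by simpa using h)]

-- the grouping loop, as a modify-fold over (key, value) pairs
theorem loop1_eq_modify_fold (emails : List (List (String × String))) (d : PySem.Dict String (List (List (String × String)))) :
    emails.foldl (fun d e =>
      let conv_id := pvCid e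
      let d := if d.contains conv_id then d else d.insert conv_id ([] : List (List (String × String)))
      d.insert conv_id (d.getD conv_id [] ++ [e])) d
    = (emails.map (fun e => (pvCid e, e))).foldl (fun d p => d.modify p.1 [] (· ++ [p.2])) d := by
  rw [List.foldl_map]
  exact PySem.List.foldl_congr_mem _ _ _ _ (fun acc x _ => stepA_eq_modify acc (pvCid x) x)

theorem getD_loop1 (emails : List (List (String × String))) (d : PySem.Dict String (List (List (String × String)))) (c : String) :
    ((emails.map (fun e => (pvCid e, e))).foldl (fun d p => d.modify p.1 [] (· ++ [p.2])) d).getD c []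
    = d.getD c [] ++ (emails.filter (fun e => pvCid e == c)) := by
  rw [PySem.Dict.getD_foldl_modify_append]
  congr 1
  rw [List.filter_map, List.map_map]
  simp [Function.comp_def]

-- A's second loop: sorts the value at each key of K, keys untouched
theorem getD_loop2 (K : List String) (d : PySem.Dict String (List (List (String × String))))
    (hnd : K.Nodup) (c : String) :
    (K.foldl (fun d k => d.insert k (PySem.List.sorted (d.getD k []) pvSent false)) d).getD c []
    = if c ∈ K then PySem.List.sorted (d.getD c []) pvSent false else d.getD c [] := by
  induction K generalizing d with
  | nil => simp
  | cons k K ih =>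
    simp only [List.foldl_cons]
    rw [ih _ hnd.of_cons]
    by_cases hk : c = k
    · subst hk
      have hcK : c ∉ K := (List.nodup_cons.mp hnd).1
      simp [hcK, PySem.Dict.getD_insert_self]
    · simp [PySem.Dict.getD_insert_of_ne _ _ _ hk, hk]

-- x goes first when it precedes every element
theorem insertBy_forall_before {α : Type} (bef : α → α → Bool) (x : α) (l : List α)
    (h : ∀ z ∈ l, bef x z = true) : PySem.List.insertBy bef x l = x :: l := by
  cases l with
  | nil => rfl
  | cons y ys => simp [PySem.List.insertBy, h y (List.mem_cons_self)]

-- one unfolding step of insertBy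
theorem insertBy_cons {α : Type} (bef : α → α → Bool) (x y : α) (ys : List α) :
    PySem.List.insertBy bef x (y :: ys)
    = if bef x y = true then x :: y :: ys else y :: PySem.List.insertBy bef x ys := rfl

-- filtering commutes with a single stable insertion into a key-sorted list
theorem filter_insertBy (key : List (String × String) → String) (p : List (String × String) → Bool)
    (x : List (String × String)) (ys : List (List (String × String)))
    (hs : ys.Pairwise (fun a b => key a ≤ key b)) :
    (PySem.List.insertBy (fun a b => decide (key a < key b)) x ys).filter p
    = if p x then PySem.List.insertBy (fun a b => decide (key a < key b)) x (ys.filter p)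
      else ys.filter p := by
  induction ys with
  | nil => by_cases hp : p x <;> simp [PySem.List.insertBy, hp]
  | cons y ys ih =>
    have hy := (List.pairwise_cons.mp hs).1
    have hs' := (List.pairwise_cons.mp hs).2
    rw [insertBy_cons]
    by_cases hlt : (decide (key x < key y)) = true
    · rw [if_pos hlt]
      by_cases hp : p x
      · rw [if_pos hp, List.filter_cons_of_pos hp]
        by_cases hpy : p y
        · rw [List.filter_cons_of_pos hpy, insertBy_cons, if_pos hlt]
        · rw [List.filter_cons_of_neg hpy]
          rw [insertBy_forall_before]
          intro z hz
          have hzy : z ∈ ys := List.mem_of_mem_filter hz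
          simpa using lt_of_lt_of_le (of_decide_eq_true hlt) (hy z hzy)
      · rw [if_neg hp, List.filter_cons_of_neg hp]
    · rw [if_neg hlt]
      by_cases hpy : p y
      · rw [List.filter_cons_of_pos hpy, ih hs', List.filter_cons_of_pos hpy]
        by_cases hp : p x
        · rw [if_pos hp, if_pos hp, insertBy_cons, if_neg hlt]
        · rw [if_neg hp, if_neg hp]
      · rw [List.filter_cons_of_neg hpy, ih hs', List.filter_cons_of_neg hpy]

theorem sorted_append_singleton (xs : List (List (String × String))) (x : List (String × String))
    (key : List (String × String) → String) :
    PySem.List.sorted (xs ++ [x]) key false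
    = PySem.List.insertBy (fun a b => decide (key a < key b)) x (PySem.List.sorted xs key false) := by
  simp [PySem.List.sorted, List.foldl_append]

-- THE STABILITY FACT: a filter of the global stable sort IS the stable sort of the filter
theorem filter_sorted (xs : List (List (String × String))) (p : List (String × String) → Bool)
    (key : List (String × String) → String) :
    (PySem.List.sorted xs key false).filter p = PySem.List.sorted (xs.filter p) key false := by
  induction xs using List.reverseRecOn with
  | nil => simp [PySem.List.sorted]
  | append_singleton xs x ih =>
    rw [sorted_append_singleton, filter_insertBy key _ x _ (PySem.List.sorted_pairwise xs key),
      ih, List.filter_append]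
    by_cases hp : p x
    · simp [hp, sorted_append_singleton]
    · simp [hp]

-- B's first loop: every value is []
theorem getD_initB (emails : List (List (String × String))) (d : PySem.Dict String (List (List (String × String))))
    (h : ∀ c, d.getD c [] = []) (c : String) :
    (emails.foldl (fun d e => d.insert (pvCid e) ([] : List (List (String × String)))) d).getD c [] = [] := by
  induction emails generalizing d with
  | nil => exact h c
  | cons e es ih =>
    simp only [List.foldl_cons]
    refine ih _ (fun c' => ?_)
    rw [PySem.Dict.getD_insert]
    split <;> simp [h]

theorem set_update_subset (s : PySem.Set String) (l : List String) (h : ∀ x ∈ l, x ∈ s) :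
    PySem.Set.update s l = s := by
  induction l generalizing s with
  | nil => rfl
  | cons x l ih =>
    have hx : s.contains x = true := by
      simpa using List.elem_eq_true_of_mem (h x List.mem_cons_self)
    simp only [PySem.Set.update, List.foldl_cons, PySem.Set.add, hx, if_pos]
    exact ih s (fun y hy => h y (List.mem_cons_of_mem _ hy))

-- the two dicts returned have the same keys and the same value at every key
theorem build_threads_eq (emails : List (List (String × String))) :
    build_threads emails = build_threads_alt emails := by
  unfold build_threads build_threads_alt
  -- the dicts of the two programs
  set f1 : PySem.Dict String (List (List (String × String))) → List (String × String) → PySem.Dict String (List (List (String × String))) :=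
    fun d e =>
      let conv_id := pvCid e
      let d := if d.contains conv_id then d else d.insert conv_id ([] : List (List (String × String)))
      d.insert conv_id (d.getD conv_id [] ++ [e]) with hf1
  have hA1 : emails.foldl f1 PySem.Dict.empty
      = (emails.map (fun e => (pvCid e, e))).foldl (fun d p => d.modify p.1 [] (· ++ [p.2])) PySem.Dict.empty :=
    loop1_eq_modify_fold emails PySem.Dict.empty
  -- keys of A's grouping dict
  have hKA : (emails.foldl f1 PySem.Dict.empty).keys = PySem.Set.ofList (emails.map pvCid) := by
    rw [hA1, List.foldl_map]
    rw [PySem.Dict.keys_foldl_modify_key (key := pvCid)]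
    simp [PySem.Set.update, PySem.Set.ofList, PySem.Dict.keys_empty, PySem.Set.empty]
  have hNA : (emails.foldl f1 PySem.Dict.empty).keys.Nodup := by
    rw [hA1, List.foldl_map]
    exact PySem.Dict.nodup_keys_foldl_modify_key _ _ _ _ _ PySem.Dict.nodup_keys_empty
  -- value of A's grouping dict
  have hVA : ∀ c, (emails.foldl f1 PySem.Dict.empty).getD c [] = emails.filter (fun e => pvCid e == c) := by
    intro c; rw [hA1, getD_loop1]; simp
  -- A's final dict
  set dA := (emails.foldl f1 PySem.Dict.empty).keys.foldl
      (fun d k => d.insert k (PySem.List.sorted (d.getD k []) pvSent false)) (emails.foldl f1 PySem.Dict.empty) with hdA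
  have hKA2 : dA.keys = PySem.Set.ofList (emails.map pvCid) := by
    rw [hdA, PySem.Dict.keys_foldl_insert, hKA, set_update_subset _ _ (fun x hx => hx)]
  have hNA2 : dA.keys.Nodup := by rw [hKA2]; exact PySem.Set.nodup_ofList _
  have hVA2 : ∀ c, c ∈ dA.keys → dA.getD c []
      = PySem.List.sorted (emails.filter (fun e => pvCid e == c)) pvSent false := by
    intro c hc
    rw [hdA, getD_loop2 _ _ hNA, hVA]
    rw [hKA2] at hc
    simp [hKA, hc]
  -- B's dict
  set d0 := emails.foldl (fun d e => d.insert (pvCid e) ([] : List (List (String × String)))) PySem.Dict.empty with hd0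
  set dB := (PySem.List.sorted emails pvSent false).foldl
      (fun d e => d.insert (pvCid e) (d.getD (pvCid e) [] ++ [e])) d0 with hdB
  have hdBmod : dB = ((PySem.List.sorted emails pvSent false).map (fun e => (pvCid e, e))).foldl
      (fun d p => d.modify p.1 [] (· ++ [p.2])) d0 := by
    rw [hdB, List.foldl_map]; rfl
  have hK0 : d0.keys = PySem.Set.ofList (emails.map pvCid) := by
    rw [hd0, PySem.Dict.keys_foldl_insert_key (key := pvCid)]
    simp [PySem.Set.update, PySem.Set.ofList, PySem.Dict.keys_empty, PySem.Set.empty]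
  have hKB : dB.keys = PySem.Set.ofList (emails.map pvCid) := by
    rw [hdBmod, List.foldl_map, PySem.Dict.keys_foldl_modify_key (key := pvCid), hK0]
    refine set_update_subset _ _ (fun x hx => ?_)
    rcases List.mem_map.mp hx with ⟨e, he, rfl⟩
    exact (PySem.Set.mem_ofList _ _).mpr
      (List.mem_map.mpr ⟨e, (PySem.List.mem_sorted _ _ _ _).mp he, rfl⟩)
  have hNB : dB.keys.Nodup := by rw [hKB]; exact PySem.Set.nodup_ofList _
  have hVB : ∀ c, dB.getD c []
      = PySem.List.sorted (emails.filter (fun e => pvCid e == c)) pvSent false := by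
    intro c
    rw [hdBmod, getD_loop1, getD_initB _ _ (fun c => PySem.Dict.getD_empty _ _) c, List.nil_append]
    exact filter_sorted emails (fun e => pvCid e == c) pvSent
  -- items agree
  rw [PySem.Dict.items_eq_map_keys dA hNA2 [], PySem.Dict.items_eq_map_keys dB hNB []]
  rw [hKA2, hKB]
  refine List.map_congr_left (fun k hk => ?_)
  rw [hVA2 k (by rw [hKA2]; exact hk), hVB k]

-- ===== VERDICT (by name: the statement is the Claim_ definition above) =====
theorem build_threads_spec : Claim_equal_build_threads := by
  intro emails _ _
  exact build_threads_eq emails
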